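-- pv_equiv track=rewrite | github.com/Chad-Mowbray/iamb-classifier | iambic_line_processors/combinations_graph.py | get_word_combinations
-- ===== SOURCE A (Python) =====
-- import itertools
--
-- def get_word_combinations(word, zero_stress_idxs):
--     possible_words = []
--     for possible in itertools.product([0,2],repeat=len(zero_stress_idxs)):
--         word_copy = [s for s in word]
--         for i,p in enumerate(possible):
--             for j,s in enumerate(word_copy):
--                 if j != zero_stress_idxs[i]:
--                     word_copy[j] = s
--                 else:
--                     word_copy[j] = p
--         possible_words.append(word_copy)
--     return possible_words
-- ===== SOURCE B (Python) =====
-- def get_word_combinations(word, zero_stress_idxs):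
--     variants = [list(word)]
--     for idx in zero_stress_idxs:
--         new_variants = []
--         for w in variants:
--             for p in (0, 2):
--                 copy = list(w)
--                 if 0 <= idx < len(copy):
--                     copy[idx] = p
--                 new_variants.append(copy)
--         variants = new_variants
--     return variants
-- ===== Notes on version B (the rewrite author's own statement) =====
-- stated objective: faster
-- what changed: Replaces itertools.product over 2^k stress tuples with a full word rescan per tuple position by incremental doubling of a working variant list, setting each index once per copy (no per-tuple rescans).
import Mathlib
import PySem

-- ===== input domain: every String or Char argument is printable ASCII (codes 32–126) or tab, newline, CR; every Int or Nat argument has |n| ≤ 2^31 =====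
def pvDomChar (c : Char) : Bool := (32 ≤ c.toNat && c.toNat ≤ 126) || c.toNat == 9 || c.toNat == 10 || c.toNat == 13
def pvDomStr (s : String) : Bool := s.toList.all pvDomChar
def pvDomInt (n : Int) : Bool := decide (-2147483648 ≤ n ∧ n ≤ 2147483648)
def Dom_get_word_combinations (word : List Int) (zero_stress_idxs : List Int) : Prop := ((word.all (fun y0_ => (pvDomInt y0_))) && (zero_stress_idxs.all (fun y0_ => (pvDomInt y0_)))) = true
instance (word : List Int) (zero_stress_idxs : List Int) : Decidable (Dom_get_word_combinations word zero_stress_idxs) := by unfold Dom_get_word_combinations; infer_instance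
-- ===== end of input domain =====

-- B replaces A's itertools.product enumeration (2^k tuples, each rescanning the whole word
-- per tuple position) by incremental doubling of a working variant list; objective: faster
-- (constant factor: the nested per-tuple rescan disappears).

-- ===== PORT A =====
-- itertools.product([0,2], repeat=k): first coordinate varies slowest
def pvProdTwo : Nat → List (List Int)
  | 0 => [[]]
  | n + 1 => ([0, 2] : List Int).flatMap (fun v => (pvProdTwo n).map (fun t => v :: t))

def get_word_combinations (word : List Int) (zero_stress_idxs : List Int) : List (List Int) :=
  (pvProdTwo zero_stress_idxs.length).foldl
    (fun possible_words possible =>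
      let word_copy :=
        (PySem.List.enumerate possible 0).foldl
          (fun wc ip =>
            (PySem.List.enumerate wc 0).map
              (fun js =>
                if js.1 ≠ PySem.List.pyGetD zero_stress_idxs ip.1 0 then js.2 else ip.2))
          word
      possible_words ++ [word_copy])
    []

-- ===== PORT B =====
def get_word_combinations_alt (word : List Int) (zero_stress_idxs : List Int) : List (List Int) :=
  zero_stress_idxs.foldl
    (fun variants idx =>
      variants.foldl
        (fun new_variants w =>
          ([0, 2] : List Int).foldl
            (fun nv p =>
              let copy := if 0 ≤ idx ∧ idx < (w.length : Int) then w.set idx.toNat p else w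
              nv ++ [copy])
            new_variants)
        [])
    [word]

-- ===== PRECONDITION & SPEC =====
def Spec_get_word_combinations (word : List Int) (zero_stress_idxs : List Int) (out : List (List Int)) : Prop := out = get_word_combinations_alt word zero_stress_idxs
instance (word : List Int) (zero_stress_idxs : List Int) (out : List (List Int)) : Decidable (Spec_get_word_combinations word zero_stress_idxs out) := by unfold Spec_get_word_combinations; infer_instance

-- ===== CLAIM (what is proved, stated in full; the proofs are below) =====
def Claim_equal_get_word_combinations : Prop := ∀ (word : List Int) (zero_stress_idxs : List Int), Dom_get_word_combinations word zero_stress_idxs → Spec_get_word_combinations word zero_stress_idxs (get_word_combinations word zero_stress_idxs)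

-- ===== LEMMAS AND PROOFS =====

-- "set position idx to p if 0 <= idx < length, else leave unchanged"
def pvSetIf (w : List Int) (idx p : Int) : List Int :=
  if 0 ≤ idx ∧ idx < (w.length : Int) then w.set idx.toNat p else w

-- A's innermost rebuild pass, generalized over the enumerate start
theorem pv_apply_one (wc : List Int) (idx p : Int) (s : Int) :
    (PySem.List.enumerate wc s).map (fun js => if js.1 ≠ idx then js.2 else p)
      = if s ≤ idx ∧ idx < s + (wc.length : Int)
          then wc.set (idx - s).toNat p else wc := by
  induction wc generalizing s with
  | nil => simp
  | cons x xs ih =>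
    rw [PySem.List.enumerate_cons]
    simp only [List.map_cons, ih (s + 1), List.length_cons, Nat.cast_add, Nat.cast_one]
    by_cases h : idx = s
    · subst h
      have h0 : (idx - idx).toNat = 0 := by omega
      rw [if_neg (by simp), if_neg (by omega), if_pos ⟨le_refl _, by omega⟩, h0,
        List.set_cons_zero]
    · rw [if_pos (fun he => h he.symm)]
      by_cases hc : s + 1 ≤ idx ∧ idx < s + 1 + (xs.length : Int)
      · rw [if_pos hc, if_pos (by omega)]
        have h1 : (idx - s).toNat = (idx - (s + 1)).toNat + 1 := by omega
        rw [h1, List.set_cons_succ]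
      · rw [if_neg hc, if_neg (by omega)]

theorem pv_apply_one0 (wc : List Int) (idx p : Int) :
    (PySem.List.enumerate wc 0).map (fun js => if js.1 ≠ idx then js.2 else p)
      = pvSetIf wc idx p := by
  rw [pv_apply_one wc idx p 0, pvSetIf]
  simp

-- A's per-tuple fold, abstracted
def pvInner (idxs word possible : List Int) : List Int :=
  (PySem.List.enumerate possible 0).foldl
    (fun wc ip =>
      (PySem.List.enumerate wc 0).map
        (fun js => if js.1 ≠ PySem.List.pyGetD idxs ip.1 0 then js.2 else ip.2))
    word

-- shifting the enumerate start past a cons of the index list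
theorem pv_inner_shift (idx : Int) (rest : List Int) (t : List Int) :
    ∀ (s : Nat) (w : List Int),
      (PySem.List.enumerate t ((s : Int) + 1)).foldl
          (fun wc ip =>
            (PySem.List.enumerate wc 0).map
              (fun js => if js.1 ≠ PySem.List.pyGetD (idx :: rest) ip.1 0 then js.2 else ip.2)) w
        = (PySem.List.enumerate t (s : Int)).foldl
            (fun wc ip =>
              (PySem.List.enumerate wc 0).map
                (fun js => if js.1 ≠ PySem.List.pyGetD rest ip.1 0 then js.2 else ip.2)) w := by
  induction t with
  | nil => intro s w; simp
  | cons x xs ih =>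
    intro s w
    rw [PySem.List.enumerate_cons, PySem.List.enumerate_cons, List.foldl_cons, List.foldl_cons]
    have hidx : PySem.List.pyGetD (idx :: rest) ((s : Int) + 1) 0
        = PySem.List.pyGetD rest (s : Int) 0 := by
      have hc : ((s : Int) + 1) = ((s + 1 : Nat) : Int) := by push_cast; ring
      rw [hc, PySem.List.pyGetD_natCast, PySem.List.pyGetD_natCast, List.getD_cons_succ]
    rw [hidx]
    have h2 : ((s : Int) + 1 + 1) = (((s + 1 : Nat) : Int) + 1) := by push_cast; ring
    rw [h2, ih (s + 1)]
    norm_num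

theorem pv_inner_cons (idx : Int) (rest : List Int) (word v : _) (t : List Int) :
    pvInner (idx :: rest) word (v :: t) = pvInner rest (pvSetIf word idx v) t := by
  unfold pvInner
  rw [PySem.List.enumerate_cons, List.foldl_cons]
  have h0 : PySem.List.pyGetD (idx :: rest) (0 : Int) 0 = idx := by
    exact PySem.List.pyGetD_zero_cons idx rest 0
  rw [h0, pv_apply_one0]
  exact pv_inner_shift idx rest t 0 (pvSetIf word idx v)

-- A as a map over the tuple list
theorem pv_A_eq_map (word idxs : List Int) :
    get_word_combinations word idxs
      = (pvProdTwo idxs.length).map (pvInner idxs word) := by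
  unfold get_word_combinations
  rw [PySem.List.foldl_append_singleton_eq_map]
  rfl

-- B's one doubling step, abstracted, and its flatMap form
def pvStep (variants : List (List Int)) (idx : Int) : List (List Int) :=
  variants.foldl
    (fun new_variants w =>
      ([0, 2] : List Int).foldl
        (fun nv p =>
          let copy := if 0 ≤ idx ∧ idx < (w.length : Int) then w.set idx.toNat p else w
          nv ++ [copy])
        new_variants)
    []

theorem pv_step_eq_flatMap (variants : List (List Int)) (idx : Int) :
    pvStep variants idx
      = variants.flatMap (fun w => [pvSetIf w idx 0, pvSetIf w idx 2]) := by
  have h : pvStep variants idx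
      = variants.foldl (fun acc w => acc ++ [pvSetIf w idx 0, pvSetIf w idx 2]) [] := by
    unfold pvStep
    congr 1
    funext acc w
    simp [pvSetIf]
  rw [h, PySem.List.foldl_append_eq_flatMap]
  simp

theorem pv_fold_append (idxs : List Int) :
    ∀ (as bs : List (List Int)),
      idxs.foldl pvStep (as ++ bs) = idxs.foldl pvStep as ++ idxs.foldl pvStep bs := by
  induction idxs with
  | nil => intro as bs; simp
  | cons i r ih =>
    intro as bs
    simp only [List.foldl_cons]
    rw [pv_step_eq_flatMap, List.flatMap_append, ← pv_step_eq_flatMap, ← pv_step_eq_flatMap, ih]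

theorem pv_main (idxs : List Int) : ∀ (word : List Int),
    get_word_combinations word idxs = get_word_combinations_alt word idxs := by
  induction idxs with
  | nil =>
    intro word
    rw [pv_A_eq_map]
    simp [pvProdTwo, pvInner, get_word_combinations_alt]
  | cons idx rest ih =>
    intro word
    have hB : get_word_combinations_alt word (idx :: rest)
        = get_word_combinations_alt (pvSetIf word idx 0) rest
          ++ get_word_combinations_alt (pvSetIf word idx 2) rest := by
      show rest.foldl pvStep (pvStep [word] idx) = _
      have h1 : pvStep [word] idx = [pvSetIf word idx 0] ++ [pvSetIf word idx 2] := by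
        rw [pv_step_eq_flatMap]; simp
      rw [h1, pv_fold_append]
      rfl
    rw [hB, pv_A_eq_map]
    show (pvProdTwo (rest.length + 1)).map (pvInner (idx :: rest) word) = _
    rw [pvProdTwo]
    simp only [List.flatMap_cons, List.flatMap_nil, List.append_nil, List.map_append,
      List.map_map]
    have hv : ∀ v : Int,
        (pvProdTwo rest.length).map (pvInner (idx :: rest) word ∘ (fun t => v :: t))
          = get_word_combinations_alt (pvSetIf word idx v) rest := by
      intro v
      have hc : (pvInner (idx :: rest) word ∘ fun t => v :: t)
          = pvInner rest (pvSetIf word idx v) := by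
        funext t
        simp [Function.comp, pv_inner_cons]
      rw [hc, ← pv_A_eq_map, ih]
    rw [hv 0, hv 2]

-- ===== VERDICT (by name: the statement is the Claim_ definition above) =====
theorem get_word_combinations_spec : Claim_equal_get_word_combinations := by
  intro word idxs _
  unfold Spec_get_word_combinations
  exact pv_main idxs word
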